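-- pv_equiv track=rewrite | github.com/milos11th/FootballNS | football_time_ns/views.py | compute_free_intervals
-- ===== SOURCE A (Python) =====
-- def intervals_overlap(a_start, a_end, b_start, b_end):
--     return a_start < b_end and b_start < a_end
--
-- def compute_free_intervals(availabilities, busy_intervals):
--     free = []
--     for a_start, a_end in availabilities:
--         parts = [(a_start, a_end)]
--         for b_start, b_end in busy_intervals:
--             new_parts = []
--             for p_start, p_end in parts:
--                 if intervals_overlap(p_start,p_end,b_start,b_end):
--                     if p_start < b_start:
--                         new_parts.append((p_start, min(p_end, b_start)))
--                     if b_end < p_end: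
--                         new_parts.append((max(p_start, b_end), p_end))
--                 else:
--                     new_parts.append((p_start,p_end))
--             parts = new_parts
--         free.extend(parts)
--     return [(s,e) for s,e in free if s < e]
-- ===== SOURCE B (Python) =====
-- def compute_free_intervals(availabilities, busy_intervals):
--     # Divide-and-conquer: a window carved by a busy list = carve by the first
--     # half, then carve each resulting piece by the second half; empty pieces
--     # are pruned as soon as they appear instead of being filtered at the end.
--     def carve(s, e, busy):
--         if not busy:
--             return [(s, e)] if s < e else []
--         if len(busy) == 1:
--             bs, be = busy[0]
--             if s < be and bs < e:
--                 out = []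
--                 if s < bs:
--                     out.append((s, min(e, bs)))
--                 if be < e:
--                     out.append((max(s, be), e))
--                 return out
--             return [(s, e)] if s < e else []
--         k = len(busy) // 2
--         return [q for p in carve(s, e, busy[:k]) for q in carve(p[0], p[1], busy[k:])]
--
--     return [p for (a_s, a_e) in availabilities for p in carve(a_s, a_e, busy_intervals)]
-- ===== Notes on version B (the rewrite author's own statement) =====
-- stated objective: alternative
-- what changed: Replaces A's iterative per-busy-interval resplitting of a parts list (rebuilding new_parts for every busy interval, filtering empties only at the end) by a divide-and-conquer recursion that carves a window by the first half of the busy list, carves each resulting piece by the second half, and prunes empty pieces immediately.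
import Mathlib
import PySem

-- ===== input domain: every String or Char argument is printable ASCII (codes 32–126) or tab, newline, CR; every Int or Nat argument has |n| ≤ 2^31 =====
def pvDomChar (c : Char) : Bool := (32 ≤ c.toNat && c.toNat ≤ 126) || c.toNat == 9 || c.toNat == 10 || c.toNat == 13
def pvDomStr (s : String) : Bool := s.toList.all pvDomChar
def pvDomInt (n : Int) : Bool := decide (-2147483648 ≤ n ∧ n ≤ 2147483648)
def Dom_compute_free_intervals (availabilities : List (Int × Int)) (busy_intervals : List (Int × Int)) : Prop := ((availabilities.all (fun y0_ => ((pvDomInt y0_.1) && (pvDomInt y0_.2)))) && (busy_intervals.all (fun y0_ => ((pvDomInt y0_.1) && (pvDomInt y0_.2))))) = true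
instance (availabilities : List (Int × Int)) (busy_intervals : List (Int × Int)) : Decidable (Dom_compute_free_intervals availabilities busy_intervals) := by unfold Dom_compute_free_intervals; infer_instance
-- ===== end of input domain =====

-- B replaces A's iterative per-busy-interval resplitting of a parts list by a
-- divide-and-conquer recursion over the busy list that prunes empty pieces early
-- (objective: alternative; same result on every input).

-- ===== PORT A =====
def intervals_overlap (a_start a_end b_start b_end : Int) : Bool :=
  a_start < b_end && b_start < a_end

def compute_free_intervals (availabilities : List (Int × Int)) (busy_intervals : List (Int × Int)) : List (Int × Int) :=
  let free := availabilities.foldl (fun free a =>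
    let parts := busy_intervals.foldl (fun parts b =>
      parts.foldl (fun new_parts p =>
        if intervals_overlap p.1 p.2 b.1 b.2 then
          new_parts
            ++ (if p.1 < b.1 then [(p.1, min p.2 b.1)] else [])
            ++ (if b.2 < p.2 then [(max p.1 b.2, p.2)] else [])
        else
          new_parts ++ [(p.1, p.2)]) []) [(a.1, a.2)]
    free ++ parts) []
  free.filter (fun p => decide (p.1 < p.2))

-- ===== PORT B =====
def carveB (s e : Int) (busy : List (Int × Int)) : List (Int × Int) :=
  match busy with
  | [] => if s < e then [(s, e)] else []
  | [b] =>
      if s < b.2 ∧ b.1 < e then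
        (if s < b.1 then [(s, min e b.1)] else []) ++ (if b.2 < e then [(max s b.2, e)] else [])
      else if s < e then [(s, e)] else []
  | b1 :: b2 :: rest =>
      let k := (b1 :: b2 :: rest).length / 2
      ((b1 :: b2 :: rest).take k |> carveB s e).flatMap
        (fun p => carveB p.1 p.2 ((b1 :: b2 :: rest).drop k))
termination_by busy.length
decreasing_by
  · simp; omega
  · simp; omega

def compute_free_intervals_alt (availabilities : List (Int × Int)) (busy_intervals : List (Int × Int)) : List (Int × Int) :=
  availabilities.flatMap (fun a => carveB a.1 a.2 busy_intervals)

-- ===== PRECONDITION & SPEC =====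
def Spec_compute_free_intervals (availabilities : List (Int × Int)) (busy_intervals : List (Int × Int)) (out : List (Int × Int)) : Prop := out = compute_free_intervals_alt availabilities busy_intervals
instance (availabilities : List (Int × Int)) (busy_intervals : List (Int × Int)) (out : List (Int × Int)) : Decidable (Spec_compute_free_intervals availabilities busy_intervals out) := by unfold Spec_compute_free_intervals; infer_instance

-- ===== CLAIM (what is proved, stated in full; the proofs are below) =====
def Claim_equal_compute_free_intervals : Prop := ∀ (availabilities : List (Int × Int)) (busy_intervals : List (Int × Int)), Dom_compute_free_intervals availabilities busy_intervals → Spec_compute_free_intervals availabilities busy_intervals (compute_free_intervals availabilities busy_intervals)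

-- ===== LEMMAS AND PROOFS =====

-- A's one-busy-interval split of one part (the body of A's innermost loop, as a function)
def splitF (b p : Int × Int) : List (Int × Int) :=
  if intervals_overlap p.1 p.2 b.1 b.2 then
    (if p.1 < b.1 then [(p.1, min p.2 b.1)] else [])
      ++ (if b.2 < p.2 then [(max p.1 b.2, p.2)] else [])
  else [(p.1, p.2)]

-- A's middle loop (one busy interval applied to all parts) is a flatMap of splitF
theorem stepA_eq_flatMap (b : Int × Int) (parts : List (Int × Int)) :
    parts.foldl (fun new_parts p =>
      if intervals_overlap p.1 p.2 b.1 b.2 then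
        new_parts
          ++ (if p.1 < b.1 then [(p.1, min p.2 b.1)] else [])
          ++ (if b.2 < p.2 then [(max p.1 b.2, p.2)] else [])
      else
        new_parts ++ [(p.1, p.2)]) []
    = parts.flatMap (splitF b) := by
  have h : ∀ (l : List (Int × Int)) (acc : List (Int × Int)),
      l.foldl (fun new_parts p =>
        if intervals_overlap p.1 p.2 b.1 b.2 then
          new_parts
            ++ (if p.1 < b.1 then [(p.1, min p.2 b.1)] else [])
            ++ (if b.2 < p.2 then [(max p.1 b.2, p.2)] else [])
        else
          new_parts ++ [(p.1, p.2)]) acc = acc ++ l.flatMap (splitF b) := by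
    intro l
    induction l with
    | nil => simp
    | cons p t ih =>
      intro acc
      simp only [List.foldl_cons, List.flatMap_cons, ih, splitF]
      split <;> simp
  simpa using h parts []

-- an empty window stays empty under carving
theorem carveB_empty (s e : Int) (busy : List (Int × Int)) : ¬ s < e → carveB s e busy = [] := by
  induction s, e, busy using carveB.induct with
  | case1 s e hlt => intro h; exact absurd hlt h
  | case2 s e hlt => intro h; simp [carveB, hlt]
  | case3 s e b hov =>
    intro h
    rw [carveB.eq_def]
    simp only []
    rw [if_pos hov, if_neg (by omega), if_neg (by omega)]
    rfl
  | case4 s e b hov hlt => intro h; exact absurd hlt h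
  | case5 s e b hov hlt => intro h; simp [carveB, hov, hlt]
  | case6 s e b1 b2 rest k ihd iht =>
    intro h
    rw [carveB.eq_def]
    simp only []
    rw [iht h]
    rfl

-- carving empty parts contributes nothing, so pre-filtering them is invisible
theorem flatMap_carveB_filter (d : List (Int × Int)) (X : List (Int × Int)) :
    (X.filter (fun p => decide (p.1 < p.2))).flatMap (fun p => carveB p.1 p.2 d)
      = X.flatMap (fun p => carveB p.1 p.2 d) := by
  induction X with
  | nil => rfl
  | cons p t ih =>
    by_cases h : p.1 < p.2
    · simp [h, ih]
    · simp [h, ih, carveB_empty _ _ _ h]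

theorem filter_eq_flatMap_ne (l : List (Int × Int)) :
    l.filter (fun p => decide (p.1 < p.2))
      = l.flatMap (fun p => if p.1 < p.2 then [(p.1, p.2)] else []) := by
  induction l with
  | nil => rfl
  | cons p t ih =>
    by_cases h : p.1 < p.2
    · simp [h, ih]
    · simp [h, ih]

-- pointwise: the pruned A-split of one part = carveB with a one-element busy list
theorem filter_splitF (bs be ps pe : Int) :
    (splitF (bs, be) (ps, pe)).filter (fun p => decide (p.1 < p.2))
      = carveB ps pe [(bs, be)] := by
  unfold splitF intervals_overlap
  rw [carveB.eq_def]
  simp only []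
  by_cases hov : ps < be ∧ bs < pe
  · rw [if_pos (by simp [hov.1, hov.2]), if_pos hov]
    by_cases h1 : ps < bs
    · by_cases h2 : be < pe
      · rw [if_pos h1, if_pos h2]
        simp only [List.filter_append, List.filter_cons, List.filter_nil, decide_eq_true_eq]
        rw [if_pos (by omega), if_pos (by omega)]
      · rw [if_pos h1, if_neg h2]
        simp only [List.filter_append, List.filter_cons, List.filter_nil, decide_eq_true_eq]
        rw [if_pos (by omega)]
    · by_cases h2 : be < pe
      · rw [if_neg h1, if_pos h2]
        simp only [List.filter_cons, List.filter_nil, decide_eq_true_eq, List.nil_append]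
        rw [if_pos (by omega)]
      · rw [if_neg h1, if_neg h2]
        rfl
  · rw [if_neg (by simpa using hov), if_neg hov]
    by_cases h : ps < pe <;> simp [h]

-- main invariant: A's busy-interval loop over any parts list, filtered, = flatMap of carveB
theorem main_invariant (n : Nat) :
    ∀ (busy : List (Int × Int)), busy.length = n → ∀ (parts : List (Int × Int)),
    (busy.foldl (fun parts b =>
      parts.foldl (fun new_parts p =>
        if intervals_overlap p.1 p.2 b.1 b.2 then
          new_parts
            ++ (if p.1 < b.1 then [(p.1, min p.2 b.1)] else [])
            ++ (if b.2 < p.2 then [(max p.1 b.2, p.2)] else [])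
        else
          new_parts ++ [(p.1, p.2)]) []) parts).filter (fun p => decide (p.1 < p.2))
      = parts.flatMap (fun p => carveB p.1 p.2 busy) := by
  induction n using Nat.strong_induction_on with
  | _ n ih =>
    intro busy hn parts
    match busy, hn with
    | [], _ =>
      simpa [carveB] using filter_eq_flatMap_ne parts
    | [b], _ =>
      simp only [List.foldl_cons, List.foldl_nil, stepA_eq_flatMap]
      rw [List.filter_flatMap]
      apply List.flatMap_congr
      intro p _
      exact filter_splitF b.1 b.2 p.1 p.2
    | b1 :: b2 :: rest, hn =>
      have hlen : (b1 :: b2 :: rest).length = n := hn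
      set bl := b1 :: b2 :: rest with hbl
      have h2 : 2 ≤ bl.length := by simp [hbl]
      set k := bl.length / 2 with hk
      have hk1 : 1 ≤ k := by omega
      have hkl : k < bl.length := by omega
      have hlt : (bl.take k).length = k := by simp; omega
      have hld : (bl.drop k).length = bl.length - k := by simp
      conv_lhs => rw [show bl = bl.take k ++ bl.drop k from (List.take_append_drop k bl).symm]
      rw [List.foldl_append]
      rw [ih (bl.length - k) (by omega) (bl.drop k) hld]
      rw [← flatMap_carveB_filter]
      rw [ih k (by omega) (bl.take k) hlt]
      rw [List.flatMap_assoc]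
      apply List.flatMap_congr
      intro p _
      conv_rhs => rw [show carveB p.1 p.2 bl =
        ((bl.take k |> carveB p.1 p.2).flatMap (fun q => carveB q.1 q.2 (bl.drop k))) from by
          rw [hbl, carveB.eq_def]]

-- ===== VERDICT (by name: the statement is the Claim_ definition above) =====
theorem compute_free_intervals_spec : Claim_equal_compute_free_intervals := by
  intro availabilities busy_intervals _
  unfold Spec_compute_free_intervals
  simp only [compute_free_intervals, compute_free_intervals_alt]
  rw [PySem.List.foldl_append_eq_flatMap]
  simp only [List.nil_append]
  rw [List.filter_flatMap]
  apply List.flatMap_congr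
  intro a _
  simpa using main_invariant busy_intervals.length busy_intervals rfl [(a.1, a.2)]
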